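-- pv_equiv track=rewrite | github.com/SAMLAY-c/Economics-sub-notes | 40 - Obsidian/脚本/QuickAdd/nextTopicScripts/#1格式化.py | format_markdown_notes
-- ===== SOURCE A (Python) =====
-- def format_markdown_notes(markdown_text):
--     """
--     Processes Markdown text to remove a blank line between a line starting
--     with "## " or "### " and a subsequent line starting with "  #1".
--
--     Args:
--         markdown_text (str): The input Markdown text as a single string.
--
--     Returns:
--         str: The processed Markdown text.
--     """
--     lines = markdown_text.splitlines()
--     processed_lines = []
--     i = 0
--     n = len(lines)
--
--     while i < n:
--         current_line = lines[i]
--         # Check for the pattern: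
--         # 1. Current line starts with "## " OR "### "
--         # 2. There is a next line (i+1)
--         # 3. The next line is blank
--         # 4. There is a line after the blank line (i+2)
--         # 5. The line after the blank line starts with "  #1"
--         if (current_line.startswith("## ") or current_line.startswith("### ")) and \
--            (i + 2 < n) and \
--            lines[i+1].strip() == "" and \
--            lines[i+2].startswith("  #1"):
--
--             processed_lines.append(current_line)  # Add the "## " or "### " line
--             # Skip the blank line (lines[i+1])
--             processed_lines.append(lines[i+2])    # Add the "  #1" line (moved up)
--             i += 3 # Move index past the three lines processed (header, blank, #1)
--         else:
--             processed_lines.append(current_line)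
--             i += 1
--
--     return "\n".join(processed_lines)
-- ===== SOURCE B (Python) =====
-- def format_markdown_notes(markdown_text):
--     """Two-pass rewrite: first collect the indices of blank lines to delete,
--     then join every line whose index was not collected."""
--     lines = markdown_text.splitlines()
--     n = len(lines)
--     to_delete = set()
--     for i in range(n):
--         if (lines[i].startswith("## ") or lines[i].startswith("### ")) and \
--            i + 2 < n and lines[i + 1].strip() == "" and \
--            lines[i + 2].startswith("  #1"):
--             to_delete.add(i + 1)
--     return "\n".join(lines[j] for j in range(n) if j not in to_delete)
-- ===== Notes on version B (the rewrite author's own statement) =====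
-- stated objective: alternative
-- what changed: Replaced A's single lookahead-and-skip while loop (which advances by 3 past a matched header/blank/' #1' triple) with a two-pass decomposition: a first pass collects the set of blank-line indices to delete, a second pass joins the lines whose index was not collected.
import Mathlib
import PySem

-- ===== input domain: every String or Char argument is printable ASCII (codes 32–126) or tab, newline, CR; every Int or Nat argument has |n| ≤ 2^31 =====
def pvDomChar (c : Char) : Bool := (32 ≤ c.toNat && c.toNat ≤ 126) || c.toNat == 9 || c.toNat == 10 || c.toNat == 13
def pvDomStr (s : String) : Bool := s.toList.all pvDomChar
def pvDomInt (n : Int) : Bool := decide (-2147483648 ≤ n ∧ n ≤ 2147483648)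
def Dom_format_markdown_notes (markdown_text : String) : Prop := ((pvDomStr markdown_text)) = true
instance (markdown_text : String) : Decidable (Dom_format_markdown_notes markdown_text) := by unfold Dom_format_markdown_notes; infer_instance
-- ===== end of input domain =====

-- B replaces A's lookahead-and-skip while loop by a two-pass decomposition
-- (collect the blank-line indices to delete, then filter-and-join); same cost,
-- objective: alternative.

-- ===== PORT A =====
-- A's while loop: i advances by 3 on a match (header, blank, "  #1" line), else by 1.
def pvALoop (lines : List String) (n : Nat) (i : Nat) : List String :=
  if _h : i < n then
    let cur := lines.getD i ""
    if (PySem.Str.startswith cur "## " || PySem.Str.startswith cur "### ")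
        && decide (i + 2 < n)
        && (PySem.Str.strip (lines.getD (i + 1) "") == "")
        && PySem.Str.startswith (lines.getD (i + 2) "") "  #1" then
      cur :: lines.getD (i + 2) "" :: pvALoop lines n (i + 3)
    else
      cur :: pvALoop lines n (i + 1)
  else []
termination_by n - i

def format_markdown_notes (markdown_text : String) : String :=
  let lines := PySem.Str.splitlines markdown_text
  PySem.Str.join "\n" (pvALoop lines lines.length 0)

-- ===== PORT B =====
-- B's pattern test at index i (the condition of Source B's first pass).
def pvMatchB (lines : List String) (n : Nat) (i : Nat) : Bool :=
  (PySem.Str.startswith (lines.getD i "") "## "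
      || PySem.Str.startswith (lines.getD i "") "### ")
    && decide (i + 2 < n)
    && (PySem.Str.strip (lines.getD (i + 1) "") == "")
    && PySem.Str.startswith (lines.getD (i + 2) "") "  #1"

-- First pass of Source B: the set of blank-line indices to delete.
def pvToDelete (lines : List String) (n : Nat) : PySem.Set Nat :=
  (List.range n).foldl
    (fun s i => if pvMatchB lines n i then s.add (i + 1) else s)
    (PySem.Set.ofList [])

def format_markdown_notes_alt (markdown_text : String) : String :=
  let lines := PySem.Str.splitlines markdown_text
  let n := lines.length
  let toDelete := pvToDelete lines n
  PySem.Str.join "\n"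
    (((List.range n).filter (fun j => !(toDelete.contains j))).map
      (fun j => lines.getD j ""))

-- ===== PRECONDITION & SPEC =====
def Spec_format_markdown_notes (markdown_text : String) (out : String) : Prop := out = format_markdown_notes_alt markdown_text
instance (markdown_text : String) (out : String) : Decidable (Spec_format_markdown_notes markdown_text out) := by unfold Spec_format_markdown_notes; infer_instance

-- ===== CLAIM (what is proved, stated in full; the proofs are below) =====
def Claim_equal_format_markdown_notes : Prop := ∀ (markdown_text : String), Dom_format_markdown_notes markdown_text → Spec_format_markdown_notes markdown_text (format_markdown_notes markdown_text)

-- ===== LEMMAS AND PROOFS =====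

-- "j is deleted": j ≥ 1 and the pattern matched at j - 1.
def pvDel (lines : List String) (n : Nat) (j : Nat) : Bool :=
  decide (1 ≤ j) && pvMatchB lines n (j - 1)

-- a string whose strip is empty consists of whitespace only
lemma pv_strip_all_space (cs : List Char) (h : PySem.Chars.strip cs = []) :
    ∀ c ∈ cs, PySem.Chars.isspace c = true := by
  have h0 : (List.dropWhile PySem.Chars.isspace
      ((List.dropWhile PySem.Chars.isspace cs).reverse)).reverse = [] := by
    simpa [PySem.Chars.strip, PySem.Chars.rstrip, PySem.Chars.lstrip] using h
  have h1 : List.dropWhile PySem.Chars.isspace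
      ((List.dropWhile PySem.Chars.isspace cs).reverse) = [] := by
    simpa using congrArg List.reverse h0
  have hdrop : ∀ c ∈ List.dropWhile PySem.Chars.isspace cs, PySem.Chars.isspace c = true := by
    intro c hc
    exact List.dropWhile_eq_nil_iff.1 h1 c (by simpa using hc)
  intro c hc
  rw [← List.takeWhile_append_dropWhile (p := PySem.Chars.isspace) (l := cs)] at hc
  rcases List.mem_append.1 hc with h1 | h1
  · exact List.mem_takeWhile_imp h1
  · exact hdrop c h1

-- a blank line (strip == "") is not a "## " / "### " header
lemma pv_blank_not_header (s : String) (h : (PySem.Str.strip s == "") = true) :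
    PySem.Str.startswith s "## " = false ∧ PySem.Str.startswith s "### " = false := by
  have hs : PySem.Chars.strip s.toList = [] := by
    have h' : PySem.Str.strip s = "" := by simpa using h
    have h'' := congrArg String.toList h'
    simpa [PySem.Str.toList_strip] using h''
  have hall := pv_strip_all_space s.toList hs
  constructor
  · cases hx : PySem.Str.startswith s "## " with
    | false => rfl
    | true =>
      exfalso
      rcases (PySem.Chars.startswith_iff _ _).1 (by simpa using hx) with ⟨t, ht⟩
      have : PySem.Chars.isspace '#' = true := hall '#' (by rw [← ht]; simp)
      simp [PySem.Chars.isspace] at this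
  · cases hx : PySem.Str.startswith s "### " with
    | false => rfl
    | true =>
      exfalso
      rcases (PySem.Chars.startswith_iff _ _).1 (by simpa using hx) with ⟨t, ht⟩
      have : PySem.Chars.isspace '#' = true := hall '#' (by rw [← ht]; simp)
      simp [PySem.Chars.isspace] at this

-- a "  #1" line is not a header (first characters differ)
lemma pv_hash1_not_header (s : String) (h : PySem.Str.startswith s "  #1" = true) :
    PySem.Str.startswith s "## " = false ∧ PySem.Str.startswith s "### " = false := by
  rcases (PySem.Chars.startswith_iff _ _).1 (by simpa using h) with ⟨t, ht⟩
  constructor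
  · cases hx : PySem.Str.startswith s "## " with
    | false => rfl
    | true =>
      exfalso
      rcases (PySem.Chars.startswith_iff _ _).1 (by simpa using hx) with ⟨u, hu⟩
      rw [← ht] at hu
      simp at hu
  · cases hx : PySem.Str.startswith s "### " with
    | false => rfl
    | true =>
      exfalso
      rcases (PySem.Chars.startswith_iff _ _).1 (by simpa using hx) with ⟨u, hu⟩
      rw [← ht] at hu
      simp at hu

-- if pvMatchB holds at i, it fails at i+1 and at i+2
lemma pv_match_step (lines : List String) (n i : Nat)
    (h : pvMatchB lines n i = true) :
    pvMatchB lines n (i + 1) = false ∧ pvMatchB lines n (i + 2) = false := by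
  simp only [pvMatchB, Bool.and_eq_true] at h
  obtain ⟨⟨⟨-, -⟩, hblank⟩, hhash⟩ := h
  constructor
  · refine Bool.eq_false_iff.2 fun hc => ?_
    simp only [pvMatchB, Bool.and_eq_true, Bool.or_eq_true] at hc
    have hb := pv_blank_not_header _ hblank
    rcases hc.1.1.1 with h' | h'
    · rw [hb.1] at h'; exact Bool.false_ne_true h'
    · rw [hb.2] at h'; exact Bool.false_ne_true h'
  · refine Bool.eq_false_iff.2 fun hc => ?_
    simp only [pvMatchB, Bool.and_eq_true, Bool.or_eq_true] at hc
    have hb := pv_hash1_not_header _ hhash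
    rcases hc.1.1.1 with h' | h'
    · rw [hb.1] at h'; exact Bool.false_ne_true h'
    · rw [hb.2] at h'; exact Bool.false_ne_true h'

-- membership in B's first-pass fold
lemma pv_mem_foldl (lines : List String) (n : Nat) :
    ∀ (l : List Nat) (s0 : PySem.Set Nat) (x : Nat),
      x ∈ l.foldl (fun s i => if pvMatchB lines n i then s.add (i + 1) else s) s0 ↔
        x ∈ s0 ∨ ∃ i ∈ l, pvMatchB lines n i = true ∧ x = i + 1 := by
  intro l
  induction l with
  | nil => intro s0 x; simp
  | cons a l ih =>
    intro s0 x
    simp only [List.foldl_cons]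
    by_cases ha : pvMatchB lines n a = true
    · rw [if_pos ha, ih]
      simp only [PySem.Set.mem_add, List.mem_cons]
      constructor
      · rintro (h | h)
        · rcases h with h | h
          · exact Or.inl h
          · exact Or.inr ⟨a, Or.inl rfl, ha, h⟩
        · rcases h with ⟨i, hi, hm, hx⟩
          exact Or.inr ⟨i, Or.inr hi, hm, hx⟩
      · rintro (h | ⟨i, hi | hi, hm, hx⟩)
        · exact Or.inl (Or.inl h)
        · exact Or.inl (Or.inr (hi ▸ hx))
        · exact Or.inr ⟨i, hi, hm, hx⟩
    · rw [if_neg ha, ih]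
      simp only [List.mem_cons]
      constructor
      · rintro (h | ⟨i, hi, hm, hx⟩)
        · exact Or.inl h
        · exact Or.inr ⟨i, Or.inr hi, hm, hx⟩
      · rintro (h | ⟨i, hi | hi, hm, hx⟩)
        · exact Or.inl h
        · exact absurd (hi ▸ hm) ha
        · exact Or.inr ⟨i, hi, hm, hx⟩

-- to_delete membership = pvDel
lemma pv_matchB_lt (lines : List String) (n i : Nat) (h : pvMatchB lines n i = true) :
    i + 2 < n := by
  simp only [pvMatchB, Bool.and_eq_true] at h
  exact of_decide_eq_true h.1.1.2

lemma pv_contains_toDelete (lines : List String) (n j : Nat) :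
    (pvToDelete lines n).contains j = pvDel lines n j := by
  have hmem : j ∈ pvToDelete lines n ↔ pvDel lines n j = true := by
    rw [pvToDelete, pv_mem_foldl]
    simp only [PySem.Set.mem_ofList, List.not_mem_nil, false_or, List.mem_range]
    constructor
    · rintro ⟨i, hi, hm, rfl⟩
      simp [pvDel, hm]
    · intro h
      simp only [pvDel, Bool.and_eq_true, decide_eq_true_eq] at h
      obtain ⟨h1, hm⟩ := h
      refine ⟨j - 1, ?_, hm, by omega⟩
      have := pv_matchB_lt lines n (j - 1) hm
      omega
  by_cases h : pvDel lines n j = true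
  · have : j ∈ pvToDelete lines n := hmem.2 h
    rw [h]
    simpa [pysem] using this
  · have hne : ¬ j ∈ pvToDelete lines n := fun hc => h (hmem.1 hc)
    rw [Bool.eq_false_iff.2 h, Bool.eq_false_iff]
    intro hc
    exact hne (by simpa [pysem] using hc)

-- A's loop computes the index filter, provided the entry index is not deleted
lemma pv_loop_eq_filter (lines : List String) (n : Nat) :
    ∀ (k i : Nat), k = n - i → pvDel lines n i = false →
      pvALoop lines n i =
        ((List.range' i (n - i)).filter (fun j => !pvDel lines n j)).map
          (fun j => lines.getD j "") := by
  intro k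
  induction k using Nat.strong_induction_on with
  | _ k ih =>
    intro i hk hdel
    by_cases hin : i < n
    · have hcond : (((PySem.Str.startswith (lines.getD i "") "## "
          || PySem.Str.startswith (lines.getD i "") "### ")
          && decide (i + 2 < n)
          && (PySem.Str.strip (lines.getD (i + 1) "") == "")
          && PySem.Str.startswith (lines.getD (i + 2) "") "  #1")) = pvMatchB lines n i := rfl
      rw [pvALoop, dif_pos hin]
      by_cases hm : pvMatchB lines n i = true
      · rw [if_pos (hcond ▸ hm)]
        have h2n : i + 2 < n := pv_matchB_lt lines n i hm
        have hstep := pv_match_step lines n i hm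
        have hd1 : pvDel lines n (i + 1) = true := by simp [pvDel, hm]
        have hd2 : pvDel lines n (i + 2) = false := by
          simp [pvDel, hstep.1]
        have hd3 : pvDel lines n (i + 3) = false := by
          have h3 : i + 3 - 1 = i + 2 := by omega
          simp [pvDel, h3, hstep.2]
        have hrange : List.range' i (n - i) =
            i :: (i + 1) :: (i + 2) :: List.range' (i + 3) (n - (i + 3)) := by
          have h1 : n - i = (n - (i + 3)) + 3 := by omega
          rw [h1]
          simp [List.range'_succ]
        rw [hrange, ih (n - (i + 3)) (by omega) (i + 3) rfl hd3]
        simp [hdel, hd1, hd2]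
      · rw [if_neg (by rw [hcond]; simpa using hm)]
        have hd1 : pvDel lines n (i + 1) = false := by
          simp [pvDel, Bool.eq_false_iff.2 hm]
        have hrange : List.range' i (n - i) =
            i :: List.range' (i + 1) (n - (i + 1)) := by
          have h1 : n - i = (n - (i + 1)) + 1 := by omega
          rw [h1, List.range'_succ]
        rw [hrange, ih (n - (i + 1)) (by omega) (i + 1) rfl hd1]
        simp [hdel]
    · rw [pvALoop, dif_neg hin]
      have h0 : n - i = 0 := by omega
      rw [h0]
      simp

-- ===== VERDICT (by name: the statement is the Claim_ definition above) =====
theorem format_markdown_notes_spec : Claim_equal_format_markdown_notes := by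
  unfold Claim_equal_format_markdown_notes
  intro s _
  show PySem.Str.join "\n"
      (pvALoop (PySem.Str.splitlines s) (PySem.Str.splitlines s).length 0) =
    PySem.Str.join "\n"
      (((List.range (PySem.Str.splitlines s).length).filter
          (fun j => !((pvToDelete (PySem.Str.splitlines s)
              (PySem.Str.splitlines s).length).contains j))).map
        (fun j => (PySem.Str.splitlines s).getD j ""))
  generalize PySem.Str.splitlines s = lines
  congr 1
  have hfilter : (List.range lines.length).filter
        (fun j => !((pvToDelete lines lines.length).contains j)) =
      (List.range lines.length).filter (fun j => !pvDel lines lines.length j) := by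
    apply List.filter_congr
    intro j _
    rw [pv_contains_toDelete]
  rw [hfilter]
  have h0 : pvDel lines lines.length 0 = false := by simp [pvDel]
  rw [pv_loop_eq_filter lines lines.length (lines.length - 0) 0 rfl h0]
  rw [List.range_eq_range']
  simp
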